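-- pv_equiv track=rewrite | github.com/patidarmonesh/Byte-Pair-Encoding-Tokenization | BPE Implementation.py | token_id_to_string
-- ===== SOURCE A (Python) =====
-- from typing import Dict, List, Tuple
--
-- RESERVED = ["<pad>", "<unk>", "<s>", "</s>"]   # 0..3
--
-- BYTE_OFFSET = len(RESERVED)                    # 4
--
-- BOS_ID = BYTE_OFFSET + 256                     # 260 (▁)
--
-- EOS_ID = BYTE_OFFSET + 257                     # 261 (</w>)
--
-- INITIAL_VOCAB_SIZE = BYTE_OFFSET + 256 + 2     # 262
--
-- def token_id_to_string(token_id: int, merge_order: List[Tuple[int,int]], memo: Dict[int,str]) -> str: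
--     """Human-readable representation used for lexicographic tie-breaks and vocab output."""
--     if token_id in memo:
--         return memo[token_id]
--     if token_id < BYTE_OFFSET:
--         s = RESERVED[token_id]
--     elif token_id < BYTE_OFFSET + 256:
--         b = token_id - BYTE_OFFSET
--         s = chr(b) if 32 <= b <= 126 else f"<byte_{b}>"
--     elif token_id == BOS_ID:
--         s = "▁"
--     elif token_id == EOS_ID:
--         s = "</w>"
--     else:
--         idx = token_id - INITIAL_VOCAB_SIZE
--         if 0 <= idx < len(merge_order):
--             left, right = merge_order[idx]
--             s = token_id_to_string(left, merge_order, memo) + token_id_to_string(right, merge_order, memo)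
--         else:
--             s = f"<unk_{token_id}>"
--     memo[token_id] = s
--     return s
-- ===== SOURCE B (Python) =====
-- def token_id_to_string(token_id, merge_order, memo):
--     """Explicit-stack post-order traversal instead of memoized recursion; a node is
--     resolved once both children are in memo. Performs the same memo writes as A in
--     the same order; the equivalence claimed is about the return value."""
--     RESERVED = ["<pad>", "<unk>", "<s>", "</s>"]
--     stack = [token_id]
--     while stack:
--         t = stack[-1]
--         if t in memo:
--             stack.pop()
--             continue
--         if t < 4:
--             memo[t] = RESERVED[t]
--         elif t < 260:
--             b = t - 4
--             memo[t] = chr(b) if 32 <= b <= 126 else f"<byte_{b}>"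
--         elif t == 260:
--             memo[t] = "\u2581"
--         elif t == 261:
--             memo[t] = "</w>"
--         elif t < 262 + len(merge_order):
--             left, right = merge_order[t - 262]
--             if left in memo and right in memo:
--                 memo[t] = memo[left] + memo[right]
--             else:
--                 stack.append(right)
--                 stack.append(left)
--                 continue
--         else:
--             memo[t] = f"<unk_{t}>"
--         stack.pop()
--     return memo[token_id]
-- ===== Notes on version B (the rewrite author's own statement) =====
-- stated objective: alternative
-- what changed: Replaces A's memoized top-down recursion with an iterative explicit-stack post-order traversal over the merge graph (a node is resolved once both children are in memo); it performs the same memo writes in the same order and returns the same value on every input where A returns.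
import Mathlib
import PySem

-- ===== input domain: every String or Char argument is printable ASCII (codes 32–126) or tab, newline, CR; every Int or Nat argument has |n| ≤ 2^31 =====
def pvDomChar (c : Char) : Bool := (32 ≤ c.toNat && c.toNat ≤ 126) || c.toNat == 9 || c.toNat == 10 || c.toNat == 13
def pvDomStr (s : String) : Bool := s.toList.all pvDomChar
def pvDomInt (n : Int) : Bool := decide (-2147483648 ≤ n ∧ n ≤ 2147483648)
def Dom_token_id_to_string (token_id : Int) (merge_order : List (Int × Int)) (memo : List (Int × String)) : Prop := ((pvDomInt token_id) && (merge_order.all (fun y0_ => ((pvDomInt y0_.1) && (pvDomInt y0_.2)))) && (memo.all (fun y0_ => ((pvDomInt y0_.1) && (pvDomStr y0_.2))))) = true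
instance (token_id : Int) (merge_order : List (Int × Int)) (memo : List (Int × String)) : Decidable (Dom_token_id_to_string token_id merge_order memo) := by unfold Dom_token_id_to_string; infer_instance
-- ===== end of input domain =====

-- B replaces A's memoized top-down recursion by an iterative explicit-stack post-order traversal;
-- both mutate the caller's memo dict identically; the equivalence proved is about the return value.

-- ===== PORT A =====
-- module constants shared by both Pythons' leaf cases
def pvReserved : List String := ["<pad>", "<unk>", "<s>", "</s>"]

def pvByteStr (b : Int) : String :=
  if 32 ≤ b ∧ b ≤ 126 then String.ofList [Char.ofNat b.toNat] else "<byte_" ++ PySem.Int.toStr b ++ ">"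

def pvTidA : Nat → Int → List (Int × Int) → PySem.Dict Int String → String × PySem.Dict Int String
  | 0, _, _, memo => ("", memo)
  | Nat.succ fuel, token_id, merge_order, memo =>
    match PySem.Dict.get? memo token_id with
    | some s => (s, memo)
    | none =>
      if token_id < 4 then
        let s := (PySem.List.pyGet? pvReserved token_id).getD ""
        (s, memo.insert token_id s)
      else if token_id < 4 + 256 then
        let s := pvByteStr (token_id - 4)
        (s, memo.insert token_id s)
      else if token_id = 260 then ("▁", memo.insert token_id "▁")
      else if token_id = 261 then ("</w>", memo.insert token_id "</w>")
      else
        let idx := token_id - 262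
        if 0 ≤ idx ∧ idx < (merge_order.length : Int) then
          match PySem.List.pyGet? merge_order idx with
          | some lr =>
            let p := pvTidA fuel lr.1 merge_order memo
            let q := pvTidA fuel lr.2 merge_order p.2
            let s := p.1 ++ q.1
            (s, q.2.insert token_id s)
          | none => ("", memo)   -- unreachable: 0 ≤ idx < len
        else
          let s := "<unk_" ++ PySem.Int.toStr token_id ++ ">"
          (s, memo.insert token_id s)

def token_id_to_string (token_id : Int) (merge_order : List (Int × Int)) (memo : List (Int × String)) : String :=
  (pvTidA (merge_order.length + 2) token_id merge_order (PySem.Dict.mk memo)).1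

-- ===== PORT B =====
-- the while loop of Source B: fueled tail recursion over the explicit stack (fuel exhausts only outside Pre_)
def pvLoopB (mo : List (Int × Int)) : Nat → List Int → PySem.Dict Int String → PySem.Dict Int String
  | 0, _, m => m
  | _ + 1, [], m => m
  | f + 1, t :: rest, m =>
    match PySem.Dict.get? m t with
    | some _ => pvLoopB mo f rest m
    | none =>
      if t < 4 then pvLoopB mo f rest (m.insert t ((PySem.List.pyGet? pvReserved t).getD ""))
      else if t < 260 then pvLoopB mo f rest (m.insert t (pvByteStr (t - 4)))
      else if t = 260 then pvLoopB mo f rest (m.insert t "▁")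
      else if t = 261 then pvLoopB mo f rest (m.insert t "</w>")
      else if t - 262 < (mo.length : Int) then
        let lr := (PySem.List.pyGet? mo (t - 262)).getD (0, 0)
        match PySem.Dict.get? m lr.1, PySem.Dict.get? m lr.2 with
        | some ls, some rs => pvLoopB mo f rest (m.insert t (ls ++ rs))
        | _, _ => pvLoopB mo f (lr.1 :: lr.2 :: t :: rest) m
      else pvLoopB mo f rest (m.insert t ("<unk_" ++ PySem.Int.toStr t ++ ">"))

def token_id_to_string_alt (token_id : Int) (merge_order : List (Int × Int)) (memo : List (Int × String)) : String :=
  ((pvLoopB merge_order (3 ^ (merge_order.length + 2)) [token_id] (PySem.Dict.mk memo)).get? token_id).getD ""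

-- ===== PRECONDITION & SPEC =====
-- the merge-reference graph: a node expands to its two children iff it is a merge id not cut off by a memo key
def pvStep (d : PySem.Dict Int String) (mo : List (Int × Int)) (S : List Int) : List Int :=
  S.flatMap (fun t =>
    if (d.get? t).isNone ∧ 262 ≤ t ∧ t - 262 < (mo.length : Int) then
      [((PySem.List.pyGet? mo (t - 262)).getD (0, 0)).1, ((PySem.List.pyGet? mo (t - 262)).getD (0, 0)).2]
    else [])

def pvIter (d : PySem.Dict Int String) (mo : List (Int × Int)) : Nat → List Int → List Int
  | 0, S => S
  | k + 1, S => pvIter d mo k (pvStep d mo S)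

def pvReach (d : PySem.Dict Int String) (mo : List (Int × Int)) (tid : Int) : List Int :=
  (List.range (mo.length + 2)).flatMap (fun j => pvIter d mo j [tid])

-- Pre_ excludes exactly the inputs where the Python A raises: those whose merge-reference graph,
-- explored from token_id with cut-offs at memo keys, contains a reachable cycle (RecursionError)
-- or reaches an id below -4 that is not a memo key (IndexError in RESERVED[token_id]).
def Pre_token_id_to_string (token_id : Int) (merge_order : List (Int × Int)) (memo : List (Int × String)) : Prop :=
  pvIter (PySem.Dict.mk memo) merge_order (merge_order.length + 1) [token_id] = [] ∧
  ∀ t ∈ pvReach (PySem.Dict.mk memo) merge_order token_id,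
    ((PySem.Dict.mk memo).get? t).isSome ∨ -4 ≤ t
instance (token_id : Int) (merge_order : List (Int × Int)) (memo : List (Int × String)) : Decidable (Pre_token_id_to_string token_id merge_order memo) := by unfold Pre_token_id_to_string; infer_instance

def pvWitness_token_id_to_string : Int × (List (Int × Int)) × (List (Int × String)) :=
  (263, [(4, 5), (262, 6)], [])

def Spec_token_id_to_string (token_id : Int) (merge_order : List (Int × Int)) (memo : List (Int × String)) (out : String) : Prop := out = token_id_to_string_alt token_id merge_order memo
instance (token_id : Int) (merge_order : List (Int × Int)) (memo : List (Int × String)) (out : String) : Decidable (Spec_token_id_to_string token_id merge_order memo out) := by unfold Spec_token_id_to_string; infer_instance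

-- ===== CLAIM (what is proved, stated in full; the proofs are below) =====
def Claim_equal_token_id_to_string : Prop := ∀ (token_id : Int) (merge_order : List (Int × Int)) (memo : List (Int × String)), Dom_token_id_to_string token_id merge_order memo → Pre_token_id_to_string token_id merge_order memo → Spec_token_id_to_string token_id merge_order memo (token_id_to_string token_id merge_order memo)

-- ===== LEMMAS AND PROOFS =====

-- reference value function: pure fueled recursion, no memo writes
def pvW (d : PySem.Dict Int String) (mo : List (Int × Int)) : Nat → Int → String
  | 0, _ => ""
  | f + 1, t =>
    match d.get? t with
    | some s => s
    | none =>
      if t < 4 then (PySem.List.pyGet? pvReserved t).getD ""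
      else if t < 260 then pvByteStr (t - 4)
      else if t = 260 then "▁"
      else if t = 261 then "</w>"
      else if t - 262 < (mo.length : Int) then
        pvW d mo f ((PySem.List.pyGet? mo (t - 262)).getD (0, 0)).1 ++
          pvW d mo f ((PySem.List.pyGet? mo (t - 262)).getD (0, 0)).2
      else "<unk_" ++ PySem.Int.toStr t ++ ">"

def pvVal (d : PySem.Dict Int String) (mo : List (Int × Int)) (t : Int) : String :=
  pvW d mo (mo.length + 2) t

theorem pvIter_append (d : PySem.Dict Int String) (mo : List (Int × Int)) (k : Nat)
    (S1 S2 : List Int) :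
    pvIter d mo k (S1 ++ S2) = pvIter d mo k S1 ++ pvIter d mo k S2 := by
  induction k generalizing S1 S2 with
  | zero => rfl
  | succ k ih => simp only [pvIter, pvStep, List.flatMap_append]; exact ih _ _

theorem pvIter_pos (d : PySem.Dict Int String) (mo : List (Int × Int)) (k : Nat) (t : Int)
    (h : pvIter d mo k [t] = []) : 1 ≤ k := by
  cases k with
  | zero => simp [pvIter] at h
  | succ k => omega

theorem pvStep_active (d : PySem.Dict Int String) (mo : List (Int × Int)) (t : Int)
    (hd : d.get? t = none) (h1 : 262 ≤ t) (h2 : t - 262 < (mo.length : Int)) :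
    pvStep d mo [t] = [((PySem.List.pyGet? mo (t - 262)).getD (0, 0)).1,
      ((PySem.List.pyGet? mo (t - 262)).getD (0, 0)).2] := by
  simp [pvStep, hd, h1, h2]

theorem pvIter_children (d : PySem.Dict Int String) (mo : List (Int × Int)) (k : Nat) (t : Int)
    (hd : d.get? t = none) (h1 : 262 ≤ t) (h2 : t - 262 < (mo.length : Int))
    (h : pvIter d mo (k + 1) [t] = []) :
    pvIter d mo k [((PySem.List.pyGet? mo (t - 262)).getD (0, 0)).1] = [] ∧
    pvIter d mo k [((PySem.List.pyGet? mo (t - 262)).getD (0, 0)).2] = [] := by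
  have := h
  rw [show pvIter d mo (k + 1) [t] = pvIter d mo k (pvStep d mo [t]) from rfl,
    pvStep_active d mo t hd h1 h2,
    show [((PySem.List.pyGet? mo (t - 262)).getD (0, 0)).1,
      ((PySem.List.pyGet? mo (t - 262)).getD (0, 0)).2]
      = [((PySem.List.pyGet? mo (t - 262)).getD (0, 0)).1] ++
        [((PySem.List.pyGet? mo (t - 262)).getD (0, 0)).2] from rfl,
    pvIter_append] at this
  exact ⟨List.append_eq_nil_iff.mp this |>.1, List.append_eq_nil_iff.mp this |>.2⟩

theorem pvW_congr (d : PySem.Dict Int String) (mo : List (Int × Int)) :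
    ∀ (k : Nat) (t : Int) (f1 f2 : Nat), pvIter d mo k [t] = [] → k ≤ f1 → k ≤ f2 →
      pvW d mo f1 t = pvW d mo f2 t := by
  intro k
  induction k with
  | zero => intro t f1 f2 h; simp [pvIter] at h
  | succ k ih =>
    intro t f1 f2 h hf1 hf2
    obtain ⟨g1, rfl⟩ : ∃ g, f1 = g + 1 := ⟨f1 - 1, by omega⟩
    obtain ⟨g2, rfl⟩ : ∃ g, f2 = g + 1 := ⟨f2 - 1, by omega⟩
    simp only [pvW]
    cases hd : d.get? t with
    | some s => rfl
    | none =>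
      simp only
      split_ifs with h1 h2 h3 h4 h5
      · rfl
      · rfl
      · rfl
      · rfl
      · -- merge: recurse on children
        obtain ⟨hl, hr⟩ := pvIter_children d mo k t hd (by omega) h5 h
        rw [ih _ g1 g2 hl (by omega) (by omega), ih _ g1 g2 hr (by omega) (by omega)]
      · rfl

theorem pvVal_cut (d : PySem.Dict Int String) (mo : List (Int × Int)) (t : Int) (s : String)
    (hd : d.get? t = some s) : pvVal d mo t = s := by
  simp [pvVal, pvW, hd]

theorem pvVal_merge (d : PySem.Dict Int String) (mo : List (Int × Int)) (t : Int) (k : Nat)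
    (hd : d.get? t = none) (h1 : 262 ≤ t) (h2 : t - 262 < (mo.length : Int))
    (hk : k ≤ mo.length + 1) (h : pvIter d mo (k + 1) [t] = []) :
    pvVal d mo t = pvVal d mo ((PySem.List.pyGet? mo (t - 262)).getD (0, 0)).1 ++
      pvVal d mo ((PySem.List.pyGet? mo (t - 262)).getD (0, 0)).2 := by
  obtain ⟨hl, hr⟩ := pvIter_children d mo k t hd (by omega) h2 h
  have hW : pvVal d mo t = pvW d mo (k + 1) t :=
    pvW_congr d mo (k + 1) t (mo.length + 2) (k + 1) h (by omega) le_rfl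
  rw [hW]
  simp only [pvW, hd]
  rw [if_neg (by omega), if_neg (by omega), if_neg (by omega), if_neg (by omega), if_pos h2]
  rw [pvW_congr d mo k _ k (mo.length + 2) hl le_rfl (by omega),
    pvW_congr d mo k _ k (mo.length + 2) hr le_rfl (by omega)]
  rfl

-- the memo invariant: every entry is the reference value, and memo entries come from d or computed values
def pvCons (d : PySem.Dict Int String) (mo : List (Int × Int)) (m : PySem.Dict Int String) : Prop :=
  ∀ i : Int, (m.get? i = none → d.get? i = none) ∧ (∀ s, m.get? i = some s → s = pvVal d mo i)

theorem pv_cons_insert (d : PySem.Dict Int String) (mo : List (Int × Int))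
    (m : PySem.Dict Int String) (t : Int) (s : String)
    (hc : pvCons d mo m) (hs : s = pvVal d mo t) : pvCons d mo (m.insert t s) := by
  intro i
  rw [PySem.Dict.get?_insert]
  split_ifs with h
  · exact ⟨by simp, fun u hu => by subst h; simpa [hs] using hu.symm⟩
  · exact hc i

theorem pv_get?_insert_mono (m : PySem.Dict Int String) (t : Int) (v : String)
    (ht : m.get? t = none) (i : Int) (s : String) (hi : m.get? i = some s) :
    (m.insert t v).get? i = some s := by
  rw [PySem.Dict.get?_insert]
  split_ifs with h
  · subst h; rw [ht] at hi; cases hi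
  · exact hi

theorem pv_A_main (d : PySem.Dict Int String) (mo : List (Int × Int)) :
    ∀ (k : Nat) (t : Int) (m : PySem.Dict Int String) (fuel : Nat),
      pvIter d mo k [t] = [] → k ≤ mo.length + 1 → k < fuel → pvCons d mo m →
      (pvTidA fuel t mo m).1 = pvVal d mo t ∧ pvCons d mo (pvTidA fuel t mo m).2 := by
  intro k
  induction k with
  | zero => intro t m fuel h; simp [pvIter] at h
  | succ k ih =>
    intro t m fuel h hk hfuel hcons
    obtain ⟨f, rfl⟩ : ∃ f, fuel = f + 1 := ⟨fuel - 1, by omega⟩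
    simp only [pvTidA]
    cases hm : m.get? t with
    | some s => exact ⟨(hcons t).2 s hm, hcons⟩
    | none =>
      have hd : d.get? t = none := (hcons t).1 hm
      simp only
      split_ifs with hb1 hb2 hb3 hb4 hb5
      · refine ⟨?_, pv_cons_insert d mo m t _ hcons ?_⟩ <;> simp [pvVal, pvW, hd, if_pos hb1]
      · refine ⟨?_, pv_cons_insert d mo m t _ hcons ?_⟩ <;>
          · simp only [pvVal, pvW, hd]; rw [if_neg hb1, if_pos (by omega)]
      · refine ⟨?_, pv_cons_insert d mo m t _ hcons ?_⟩ <;>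
          · simp only [pvVal, pvW, hd]; rw [if_neg hb1, if_neg (by omega), if_pos hb3]
      · refine ⟨?_, pv_cons_insert d mo m t _ hcons ?_⟩ <;>
          · simp only [pvVal, pvW, hd]
            rw [if_neg hb1, if_neg (by omega), if_neg hb3, if_pos hb4]
      · -- merge branch
        obtain ⟨hge, hlt⟩ := hb5
        have h262 : (262 : Int) ≤ t := by omega
        have hmo : PySem.List.pyGet? mo (t - 262) = some ((PySem.List.pyGet? mo (t - 262)).getD (0, 0)) := by
          obtain ⟨j, hj⟩ : ∃ j : Nat, t - 262 = (j : Int) := ⟨(t - 262).toNat, by omega⟩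
          rw [hj, PySem.List.pyGet?_ofNat _ _ (by omega)]
          simp
        rw [hmo]
        simp only
        obtain ⟨hl, hr⟩ := pvIter_children d mo k t hd h262 hlt h
        obtain ⟨hsl, hc1⟩ := ih _ m f hl (by omega) (by omega) hcons
        obtain ⟨hsr, hc2⟩ := ih _ _ f hr (by omega) (by omega) hc1
        have hs : (pvTidA f ((PySem.List.pyGet? mo (t - 262)).getD (0, 0)).1 mo m).1 ++
              (pvTidA f ((PySem.List.pyGet? mo (t - 262)).getD (0, 0)).2 mo
                (pvTidA f ((PySem.List.pyGet? mo (t - 262)).getD (0, 0)).1 mo m).2).1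
            = pvVal d mo t := by
          rw [hsl, hsr, pvVal_merge d mo t k hd h262 hlt (by omega) h]
        exact ⟨hs, pv_cons_insert d mo _ t _ hc2 hs⟩
      · push Not at hb5
        refine ⟨?_, pv_cons_insert d mo m t _ hcons ?_⟩ <;>
          · simp only [pvVal, pvW, hd]
            rw [if_neg hb1, if_neg (by omega), if_neg hb3, if_neg hb4, if_neg (by omega)]

theorem pv_B_main (d : PySem.Dict Int String) (mo : List (Int × Int)) :
    ∀ (k : Nat) (t : Int) (m : PySem.Dict Int String),
      pvIter d mo k [t] = [] → k ≤ mo.length + 1 → pvCons d mo m →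
      ∃ (c : Nat) (m' : PySem.Dict Int String), 0 < c ∧ c ≤ 3 ^ k ∧
        (∀ (rest : List Int) (fuel : Nat), c ≤ fuel →
          pvLoopB mo fuel (t :: rest) m = pvLoopB mo (fuel - c) rest m') ∧
        pvCons d mo m' ∧ m'.get? t = some (pvVal d mo t) ∧
        (∀ i s, m.get? i = some s → m'.get? i = some s) := by
  intro k
  induction k with
  | zero => intro t m h; simp [pvIter] at h
  | succ k ih =>
    intro t m h hk hcons
    cases hm : m.get? t with
    | some s =>
      refine ⟨1, m, one_pos, Nat.one_le_pow _ _ (by norm_num), ?_, hcons, ?_, fun _ _ hi => hi⟩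
      · intro rest fuel hf
        obtain ⟨f, rfl⟩ : ∃ f, fuel = f + 1 := ⟨fuel - 1, by omega⟩
        simp [pvLoopB, hm]
      · rw [hm, (hcons t).2 s hm]
    | none =>
      have hd : d.get? t = none := (hcons t).1 hm
      by_cases hb1 : t < 4
      · refine ⟨1, m.insert t ((PySem.List.pyGet? pvReserved t).getD ""), one_pos,
          Nat.one_le_pow _ _ (by norm_num), ?_,
          pv_cons_insert d mo m t _ hcons (by simp [pvVal, pvW, hd, if_pos hb1]), ?_,
          pv_get?_insert_mono m t _ hm⟩
        · intro rest fuel hf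
          obtain ⟨f, rfl⟩ : ∃ f, fuel = f + 1 := ⟨fuel - 1, by omega⟩
          simp [pvLoopB, hm, if_pos hb1]
        · rw [PySem.Dict.get?_insert, if_pos rfl]
          congr 1
          simp [pvVal, pvW, hd, if_pos hb1]
      · by_cases hb2 : t < 260
        · refine ⟨1, m.insert t (pvByteStr (t - 4)), one_pos,
            Nat.one_le_pow _ _ (by norm_num), ?_,
            pv_cons_insert d mo m t _ hcons ?_, ?_, pv_get?_insert_mono m t _ hm⟩
          · intro rest fuel hf
            obtain ⟨f, rfl⟩ : ∃ f, fuel = f + 1 := ⟨fuel - 1, by omega⟩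
            simp [pvLoopB, hm, if_neg hb1, if_pos hb2]
          · simp only [pvVal, pvW, hd]; rw [if_neg hb1, if_pos hb2]
          · rw [PySem.Dict.get?_insert, if_pos rfl]
            congr 1
            simp only [pvVal, pvW, hd]; rw [if_neg hb1, if_pos hb2]
        · by_cases hb3 : t = 260
          · refine ⟨1, m.insert t "▁", one_pos, Nat.one_le_pow _ _ (by norm_num), ?_,
              pv_cons_insert d mo m t _ hcons ?_, ?_, pv_get?_insert_mono m t _ hm⟩
            · intro rest fuel hf
              obtain ⟨f, rfl⟩ : ∃ f, fuel = f + 1 := ⟨fuel - 1, by omega⟩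
              simp [pvLoopB, hm, if_neg hb1, if_neg hb2, if_pos hb3]
            · simp only [pvVal, pvW, hd]; rw [if_neg hb1, if_neg hb2, if_pos hb3]
            · rw [PySem.Dict.get?_insert, if_pos rfl]
              congr 1
              simp only [pvVal, pvW, hd]; rw [if_neg hb1, if_neg hb2, if_pos hb3]
          · by_cases hb4 : t = 261
            · refine ⟨1, m.insert t "</w>", one_pos, Nat.one_le_pow _ _ (by norm_num), ?_,
                pv_cons_insert d mo m t _ hcons ?_, ?_, pv_get?_insert_mono m t _ hm⟩
              · intro rest fuel hf
                obtain ⟨f, rfl⟩ : ∃ f, fuel = f + 1 := ⟨fuel - 1, by omega⟩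
                simp [pvLoopB, hm, if_neg hb1, if_neg hb2, if_neg hb3, if_pos hb4]
              · simp only [pvVal, pvW, hd]
                rw [if_neg hb1, if_neg hb2, if_neg hb3, if_pos hb4]
              · rw [PySem.Dict.get?_insert, if_pos rfl]
                congr 1
                simp only [pvVal, pvW, hd]
                rw [if_neg hb1, if_neg hb2, if_neg hb3, if_pos hb4]
            · by_cases hb5 : t - 262 < (mo.length : Int)
              · -- merge node
                have h262 : (262 : Int) ≤ t := by omega
                obtain ⟨hl, hr⟩ := pvIter_children d mo k t hd h262 hb5 h
                set l := ((PySem.List.pyGet? mo (t - 262)).getD (0, 0)).1 with hldef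
                set r := ((PySem.List.pyGet? mo (t - 262)).getD (0, 0)).2 with hrdef
                have hvt : pvVal d mo t = pvVal d mo l ++ pvVal d mo r :=
                  pvVal_merge d mo t k hd h262 hb5 (by omega) h
                have hk1 : 1 ≤ k := pvIter_pos d mo k l hl
                by_cases hres : (m.get? l).isSome ∧ (m.get? r).isSome
                · obtain ⟨ls, hml⟩ := Option.isSome_iff_exists.mp hres.1
                  obtain ⟨rs, hmr⟩ := Option.isSome_iff_exists.mp hres.2
                  refine ⟨1, m.insert t (ls ++ rs), one_pos,
                    Nat.one_le_pow _ _ (by norm_num), ?_,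
                    pv_cons_insert d mo m t _ hcons ?_, ?_, pv_get?_insert_mono m t _ hm⟩
                  · intro rest fuel hf
                    obtain ⟨f, rfl⟩ : ∃ f, fuel = f + 1 := ⟨fuel - 1, by omega⟩
                    simp [pvLoopB, hm, if_neg hb1, if_neg hb2, if_neg hb3, if_neg hb4,
                      if_pos hb5, ← hldef, ← hrdef, hml, hmr]
                  · rw [(hcons l).2 ls hml, (hcons r).2 rs hmr, hvt]
                  · rw [PySem.Dict.get?_insert, if_pos rfl,
                      (hcons l).2 ls hml, (hcons r).2 rs hmr, hvt]
                · -- children not both resolved: push them, run each, then resolve t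
                  obtain ⟨c1, m1, hc1pos, hc1le, hrun1, hcons1, hm1l, hmono1⟩ :=
                    ih l m hl (by omega) hcons
                  obtain ⟨c2, m2, hc2pos, hc2le, hrun2, hcons2, hm2r, hmono2⟩ :=
                    ih r m1 hr (by omega) hcons1
                  have hm2l : m2.get? l = some (pvVal d mo l) := hmono2 _ _ hm1l
                  have hcbound : c1 + c2 + 2 ≤ 3 ^ (k + 1) := by
                    have h2 : 2 ≤ 3 ^ k := le_trans (by norm_num) (Nat.pow_le_pow_right (by norm_num) hk1)
                    have : (3 : Nat) ^ (k + 1) = 3 ^ k + 3 ^ k + 3 ^ k := by ring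
                    omega
                  have hstep1 : ∀ (rest : List Int) (f : Nat),
                      pvLoopB mo (f + 1) (t :: rest) m = pvLoopB mo f (l :: r :: t :: rest) m := by
                    intro rest f
                    simp only [pvLoopB, hm]
                    rw [if_neg hb1, if_neg hb2, if_neg hb3, if_neg hb4, if_pos hb5]
                    cases hml' : m.get? l <;> cases hmr' : m.get? r <;>
                      simp_all
                  have hrest : ∀ (rest : List Int) (g : Nat),
                      pvLoopB mo (g + 1) (t :: rest) m2 =
                        pvLoopB mo g rest (match m2.get? t with
                          | some _ => m2
                          | none => m2.insert t (pvVal d mo l ++ pvVal d mo r)) := by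
                    intro rest g
                    cases hm2t : m2.get? t with
                    | some s => simp [pvLoopB, hm2t]
                    | none =>
                      simp only [pvLoopB, hm2t]
                      rw [if_neg hb1, if_neg hb2, if_neg hb3, if_neg hb4, if_pos hb5]
                      simp [← hldef, ← hrdef, hm2l, hm2r]
                  refine ⟨c1 + c2 + 2, (match m2.get? t with
                      | some _ => m2
                      | none => m2.insert t (pvVal d mo l ++ pvVal d mo r)), by omega,
                    hcbound, ?_, ?_, ?_, ?_⟩
                  · intro rest fuel hf
                    obtain ⟨f, rfl⟩ : ∃ f, fuel = f + 1 := ⟨fuel - 1, by omega⟩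
                    rw [hstep1 rest f, hrun1 _ f (by omega), hrun2 _ _ (by omega)]
                    obtain ⟨g, hg⟩ : ∃ g, f - c1 - c2 = g + 1 := ⟨f - c1 - c2 - 1, by omega⟩
                    rw [hg, hrest rest g]
                    congr 1
                    omega
                  · cases hm2t : m2.get? t with
                    | some s => simpa [hm2t] using hcons2
                    | none =>
                      simpa [hm2t] using pv_cons_insert d mo m2 t _ hcons2 hvt.symm
                  · cases hm2t : m2.get? t with
                    | some s =>
                      have := (hcons2 t).2 s hm2t
                      simp [hm2t, this]
                    | none =>
                      simp [hvt]
                  · intro i s hi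
                    have h2 := hmono2 _ _ (hmono1 _ _ hi)
                    cases hm2t : m2.get? t with
                    | some u => simpa [hm2t] using h2
                    | none =>
                      exact pv_get?_insert_mono m2 t _ hm2t i s h2
              · -- unk node
                push Not at hb5
                refine ⟨1, m.insert t ("<unk_" ++ PySem.Int.toStr t ++ ">"), one_pos,
                  Nat.one_le_pow _ _ (by norm_num), ?_,
                  pv_cons_insert d mo m t _ hcons ?_, ?_, pv_get?_insert_mono m t _ hm⟩
                · intro rest fuel hf
                  obtain ⟨f, rfl⟩ : ∃ f, fuel = f + 1 := ⟨fuel - 1, by omega⟩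
                  simp [pvLoopB, hm, if_neg hb1, if_neg hb2, if_neg hb3, if_neg hb4,
                    if_neg (by omega : ¬ t - 262 < (mo.length : Int))]
                · simp only [pvVal, pvW, hd]
                  rw [if_neg hb1, if_neg hb2, if_neg hb3, if_neg hb4, if_neg (by omega)]
                · rw [PySem.Dict.get?_insert, if_pos rfl]
                  congr 1
                  simp only [pvVal, pvW, hd]
                  rw [if_neg hb1, if_neg hb2, if_neg hb3, if_neg hb4, if_neg (by omega)]

-- ===== VERDICT (by name: the statement is the Claim_ definition above) =====
theorem pvLoopB_nil (mo : List (Int × Int)) (f : Nat) (m : PySem.Dict Int String) :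
    pvLoopB mo f [] m = m := by
  cases f <;> rfl

theorem pv_cons_init (d : PySem.Dict Int String) (mo : List (Int × Int)) : pvCons d mo d := by
  intro i
  exact ⟨fun h => h, fun s hs => (pvVal_cut d mo i s hs).symm⟩

theorem token_id_to_string_spec : Claim_equal_token_id_to_string := by
  intro tid mo memo _ hpre
  obtain ⟨hEm, _⟩ := hpre
  unfold Spec_token_id_to_string token_id_to_string token_id_to_string_alt
  have hA := pv_A_main (PySem.Dict.mk memo) mo (mo.length + 1) tid (PySem.Dict.mk memo)
    (mo.length + 2) hEm le_rfl (by omega) (pv_cons_init _ mo)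
  obtain ⟨c, m', _, hcle, hrun, _, hm't, _⟩ := pv_B_main (PySem.Dict.mk memo) mo
    (mo.length + 1) tid (PySem.Dict.mk memo) hEm le_rfl (pv_cons_init _ mo)
  have hfuel : c ≤ 3 ^ (mo.length + 2) :=
    le_trans hcle (Nat.pow_le_pow_right (by norm_num) (by omega))
  rw [hA.1, hrun [] _ hfuel, pvLoopB_nil, hm't]
  rfl
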